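-- pv_equiv track=rewrite | github.com/PrathamHande/Drowsiness_Detection | src/main_app.py | _associate_eyes_with_faces
-- ===== SOURCE A (Python) =====
-- def _associate_eyes_with_faces(faces, eyes):
--     """Associates eyes with the nearest face, returning a dictionary mapping face index to eyes and a list of unassociated eyes."""
--     face_eye_map = {i: [] for i in range(len(faces))}
--     unassociated_eyes = list(eyes)
--
--     for i, (fx, fy, fw, fh) in enumerate(faces):
--         face_center = (fx + fw // 2, fy + fh // 2)
--
--         eyes_to_remove = []
--         for j, (ex, ey, ew, eh) in enumerate(unassociated_eyes):
--             eye_center = (ex + ew // 2, ey + eh // 2)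
--
--             # Check if the eye is within the face's bounding box with some margin
--             if fx < eye_center[0] < fx + fw and fy < eye_center[1] < fy + fh:
--                 face_eye_map[i].append((ex, ey, ew, eh))
--                 eyes_to_remove.append(j)
--
--         # Remove associated eyes from the unassociated list
--         for j in sorted(eyes_to_remove, reverse=True):
--             unassociated_eyes.pop(j)
--
--     return face_eye_map, unassociated_eyes
-- ===== SOURCE B (Python) =====
-- def _associate_eyes_with_faces(faces, eyes):
--     """Associates eyes with the nearest face, returning a dictionary mapping face index to eyes and a list of unassociated eyes."""
--     def owner(eye):
--         ex, ey, ew, eh = eye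
--         cx, cy = ex + ew // 2, ey + eh // 2
--         for i, (fx, fy, fw, fh) in enumerate(faces):
--             if fx < cx < fx + fw and fy < cy < fy + fh:
--                 return i
--         return None
--
--     face_eye_map = {i: [e for e in eyes if owner(e) == i] for i in range(len(faces))}
--     unassociated_eyes = [e for e in eyes if owner(e) is None]
--     return face_eye_map, unassociated_eyes
-- ===== Notes on version B (the rewrite author's own statement) =====
-- stated objective: simpler
-- what changed: Inverts the loop nesting: instead of iterating faces and destructively popping matched eyes from a shrinking unassociated list, B computes for each eye the first containing face (lowest index wins) and builds the map and the unassociated list by plain comprehensions, removing all pop/removal bookkeeping.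
import Mathlib
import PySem

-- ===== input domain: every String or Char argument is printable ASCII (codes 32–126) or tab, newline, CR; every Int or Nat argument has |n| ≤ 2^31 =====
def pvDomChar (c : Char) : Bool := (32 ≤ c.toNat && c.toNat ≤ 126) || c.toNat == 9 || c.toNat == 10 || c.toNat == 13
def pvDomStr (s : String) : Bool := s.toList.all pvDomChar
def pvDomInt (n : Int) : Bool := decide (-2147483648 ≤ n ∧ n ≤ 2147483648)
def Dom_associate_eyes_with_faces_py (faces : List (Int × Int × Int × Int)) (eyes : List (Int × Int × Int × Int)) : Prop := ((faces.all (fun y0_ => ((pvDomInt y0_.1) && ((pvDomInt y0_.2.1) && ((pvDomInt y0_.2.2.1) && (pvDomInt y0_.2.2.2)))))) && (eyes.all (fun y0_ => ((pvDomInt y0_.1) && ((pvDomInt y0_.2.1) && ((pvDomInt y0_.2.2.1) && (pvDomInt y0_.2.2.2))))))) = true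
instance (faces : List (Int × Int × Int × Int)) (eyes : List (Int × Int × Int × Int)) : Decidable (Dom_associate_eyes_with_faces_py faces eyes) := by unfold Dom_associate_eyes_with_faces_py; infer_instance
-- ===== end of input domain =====

-- B replaces A's face-by-face destructive popping of matched eyes with a first-containing-face
-- function per eye and two plain comprehensions (objective: simpler). Equivalence of the return
-- value is proved on the whole domain; neither version mutates its arguments.

-- ===== PORT A =====
-- The Python dict {i: [] for i in range(len(faces))} has the distinct keys 0..n-1 in insertion
-- order; it is ported as the association list in that order, and face_eye_map[i].append(e) as an
-- in-place update of the entry with key i (exact for these distinct int keys).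

-- inner loop body: checks one unassociated eye against the current face
def pyInnerStep (i fx fy fw fh : Int)
    (st2 : (List (Int × List (Int × Int × Int × Int))) × List Int)
    (q : Int × (Int × Int × Int × Int)) :
    (List (Int × List (Int × Int × Int × Int))) × List Int :=
  match q, st2 with
  | (j, (ex, ey, ew, eh)), (m2, rem) =>
    let eye_center := (ex + PySem.Int.floordiv ew 2, ey + PySem.Int.floordiv eh 2)
    if fx < eye_center.1 ∧ eye_center.1 < fx + fw ∧ fy < eye_center.2 ∧ eye_center.2 < fy + fh then
      (m2.map (fun kv => if kv.1 = i then (kv.1, kv.2 ++ [(ex, ey, ew, eh)]) else kv), rem ++ [j])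
    else (m2, rem)

-- unassociated_eyes.pop(j); the index is always in range here, the none branch is unreachable
def pyPopAt (acc : List (Int × Int × Int × Int)) (j : Int) : List (Int × Int × Int × Int) :=
  match PySem.List.pop? acc j with
  | some r => r.2
  | none => acc

-- body of 'for i, (fx, fy, fw, fh) in enumerate(faces)'
def pyStepFace (st : (List (Int × List (Int × Int × Int × Int))) × List (Int × Int × Int × Int))
    (p : Int × (Int × Int × Int × Int)) :
    (List (Int × List (Int × Int × Int × Int))) × List (Int × Int × Int × Int) :=
  match p, st with
  | (i, (fx, fy, fw, fh)), (m, u) =>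
    let _face_center := (fx + PySem.Int.floordiv fw 2, fy + PySem.Int.floordiv fh 2)
    let inner := (PySem.List.enumerate u 0).foldl (pyInnerStep i fx fy fw fh) (m, ([] : List Int))
    let u2 := (PySem.List.sorted inner.2 (fun x => x) true).foldl pyPopAt u
    (inner.1, u2)

def associate_eyes_with_faces_py (faces : List (Int × Int × Int × Int)) (eyes : List (Int × Int × Int × Int)) : (List (Int × List (Int × Int × Int × Int))) × (List (Int × Int × Int × Int)) :=
  (PySem.List.enumerate faces 0).foldl pyStepFace
    ((PySem.List.pyRange 0 (faces.length : Int) 1).map (fun i => (i, ([] : List (Int × Int × Int × Int)))), eyes)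

-- ===== PORT B =====
-- owner's loop 'for i, (fx, fy, fw, fh) in enumerate(faces): … return i / return None'
def altOwnerGo (cx cy : Int) : List (Int × (Int × Int × Int × Int)) → Option Int
  | [] => none
  | (i, (fx, fy, fw, fh)) :: rest =>
    if fx < cx ∧ cx < fx + fw ∧ fy < cy ∧ cy < fy + fh then some i
    else altOwnerGo cx cy rest

-- owner(eye): index of the first face whose box contains the eye's center, else None
def altOwner (faces : List (Int × Int × Int × Int)) (eye : Int × Int × Int × Int) : Option Int :=
  match eye with
  | (ex, ey, ew, eh) =>
    altOwnerGo (ex + PySem.Int.floordiv ew 2) (ey + PySem.Int.floordiv eh 2)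
      (PySem.List.enumerate faces 0)

def associate_eyes_with_faces_py_alt (faces : List (Int × Int × Int × Int)) (eyes : List (Int × Int × Int × Int)) : (List (Int × List (Int × Int × Int × Int))) × (List (Int × Int × Int × Int)) :=
  ((PySem.List.pyRange 0 (faces.length : Int) 1).map
      (fun i => (i, eyes.filter (fun e => altOwner faces e == some i))),
   eyes.filter (fun e => (altOwner faces e).isNone))

-- ===== PRECONDITION & SPEC =====
def Spec_associate_eyes_with_faces_py (faces : List (Int × Int × Int × Int)) (eyes : List (Int × Int × Int × Int)) (out : (List (Int × List (Int × Int × Int × Int))) × (List (Int × Int × Int × Int))) : Prop := out = associate_eyes_with_faces_py_alt faces eyes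
-- instance search exceeds the default synthesis size on this nested product type, so the
-- DecidableEq witnesses are assembled explicitly (they compute by `decide`)
def pvDecEqEyeList : DecidableEq (List (Int × Int × Int × Int)) := inferInstance
def pvDecEqEntry : DecidableEq (Int × List (Int × Int × Int × Int)) :=
  @instDecidableEqProd _ _ inferInstance pvDecEqEyeList
def pvDecEqMap : DecidableEq (List (Int × List (Int × Int × Int × Int))) :=
  fun a b => @instDecidableEqList _ pvDecEqEntry a b
instance (faces : List (Int × Int × Int × Int)) (eyes : List (Int × Int × Int × Int)) (out : (List (Int × List (Int × Int × Int × Int))) × (List (Int × Int × Int × Int))) : Decidable (Spec_associate_eyes_with_faces_py faces eyes out) := by unfold Spec_associate_eyes_with_faces_py; exact @instDecidableEqProd _ _ pvDecEqMap pvDecEqEyeList _ _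

-- ===== CLAIM (what is proved, stated in full; the proofs are below) =====
def Claim_equal_associate_eyes_with_faces_py : Prop := ∀ (faces : List (Int × Int × Int × Int)) (eyes : List (Int × Int × Int × Int)), Dom_associate_eyes_with_faces_py faces eyes → Spec_associate_eyes_with_faces_py faces eyes (associate_eyes_with_faces_py faces eyes)

-- ===== LEMMAS AND PROOFS =====

-- the containment test both programs apply to a face f and an eye e
def insB (f e : Int × Int × Int × Int) : Bool :=
  decide (f.1 < e.1 + PySem.Int.floordiv e.2.2.1 2 ∧
          e.1 + PySem.Int.floordiv e.2.2.1 2 < f.1 + f.2.2.1 ∧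
          f.2.1 < e.2.1 + PySem.Int.floordiv e.2.2.2 2 ∧
          e.2.1 + PySem.Int.floordiv e.2.2.2 2 < f.2.1 + f.2.2.2)

-- B's owner as a function of the remaining (index, face) pairs
def ownerPs (ps : List (Int × (Int × Int × Int × Int))) (e : Int × Int × Int × Int) : Option Int :=
  match e with
  | (ex, ey, ew, eh) =>
    altOwnerGo (ex + PySem.Int.floordiv ew 2) (ey + PySem.Int.floordiv eh 2) ps

lemma ownerPs_cons (i : Int) (f e : Int × Int × Int × Int) (ps : List (Int × (Int × Int × Int × Int))) :
    ownerPs ((i, f) :: ps) e = if insB f e then some i else ownerPs ps e := by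
  rcases e with ⟨ex, ey, ew, eh⟩
  rcases f with ⟨fx, fy, fw, fh⟩
  simp [ownerPs, altOwnerGo, insB]

lemma ownerPs_mem (ps : List (Int × (Int × Int × Int × Int))) (e : Int × Int × Int × Int) (k : Int)
    (h : ownerPs ps e = some k) : k ∈ ps.map Prod.fst := by
  induction ps with
  | nil => rcases e with ⟨ex, ey, ew, eh⟩; simp [ownerPs, altOwnerGo] at h
  | cons p ps ih =>
    rcases p with ⟨i, f⟩
    rw [ownerPs_cons] at h
    by_cases hb : insB f e
    · simp [hb] at h; simp [h]
    · simp [hb] at h; simpa using Or.inr (ih h)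

lemma altOwner_eq_ownerPs (faces : List (Int × Int × Int × Int)) (e : Int × Int × Int × Int) :
    altOwner faces e = ownerPs (PySem.List.enumerate faces 0) e := by
  rcases e with ⟨ex, ey, ew, eh⟩; rfl

-- A's map update: append es to the entry with key i
def updMany (m : List (Int × List (Int × Int × Int × Int))) (i : Int)
    (es : List (Int × Int × Int × Int)) : List (Int × List (Int × Int × Int × Int)) :=
  m.map (fun kv => if kv.1 = i then (kv.1, kv.2 ++ es) else kv)

lemma updMany_nil (m : List (Int × List (Int × Int × Int × Int))) (i : Int) :
    updMany m i [] = m := by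
  unfold updMany
  conv_rhs => rw [← List.map_id m]
  apply List.map_congr_left
  intro kv _; split_ifs with h <;> simp

lemma updMany_updMany (m : List (Int × List (Int × Int × Int × Int))) (i : Int)
    (a b : List (Int × Int × Int × Int)) :
    updMany (updMany m i a) i b = updMany m i (a ++ b) := by
  simp only [updMany, List.map_map]
  apply List.map_congr_left
  intro kv _
  by_cases h : kv.1 = i <;> simp [h, List.append_assoc]

lemma pyInnerStep_eq (i fx fy fw fh j ex ey ew eh : Int)
    (m2 : List (Int × List (Int × Int × Int × Int))) (rem : List Int) :
    pyInnerStep i fx fy fw fh (m2, rem) (j, (ex, ey, ew, eh))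
      = if insB (fx, fy, fw, fh) (ex, ey, ew, eh)
          then (updMany m2 i [(ex, ey, ew, eh)], rem ++ [j]) else (m2, rem) := by
  simp only [pyInnerStep, insB, decide_eq_true_eq]
  split_ifs with h <;> rfl

-- 0-based positions (within u) of the eyes whose center lies in f
def idxsN (f : Int × Int × Int × Int) : List (Int × Int × Int × Int) → List Nat
  | [] => []
  | e :: t => if insB f e then 0 :: (idxsN f t).map (· + 1) else (idxsN f t).map (· + 1)

lemma idxsN_pairwise (f : Int × Int × Int × Int) (u : List (Int × Int × Int × Int)) :
    (idxsN f u).Pairwise (· < ·) := by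
  induction u with
  | nil => simp [idxsN]
  | cons e t ih =>
    have hmap : ((idxsN f t).map (· + 1)).Pairwise (· < ·) := by
      rw [List.pairwise_map]; exact ih.imp (by omega)
    by_cases hb : insB f e
    · simp only [idxsN, hb, if_true]
      refine List.pairwise_cons.2 ⟨?_, hmap⟩
      intro k hk; rcases List.mem_map.1 hk with ⟨j, _, rfl⟩; omega
    · simpa [idxsN, hb] using hmap

lemma inner_spec (i fx fy fw fh : Int) (u : List (Int × Int × Int × Int)) :
    ∀ (s : Int) (m : List (Int × List (Int × Int × Int × Int))) (r : List Int),
    (PySem.List.enumerate u s).foldl (pyInnerStep i fx fy fw fh) (m, r)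
      = (updMany m i (u.filter (insB (fx, fy, fw, fh))),
         r ++ (idxsN (fx, fy, fw, fh) u).map (fun k : Nat => s + (k : Int))) := by
  induction u with
  | nil => intro s m r; simp [PySem.List.enumerate_nil, idxsN, updMany_nil]
  | cons e t ih =>
    intro s m r
    rcases e with ⟨ex, ey, ew, eh⟩
    rw [PySem.List.enumerate_cons, List.foldl_cons, pyInnerStep_eq]
    have h3 : List.map (fun k : Nat => s + (k : Int)) ((idxsN (fx, fy, fw, fh) t).map (· + 1))
        = List.map (fun k : Nat => (s + 1) + (k : Int)) (idxsN (fx, fy, fw, fh) t) := by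
      rw [List.map_map]; apply List.map_congr_left; intro k _
      simp only [Function.comp_apply]; push_cast; ring
    by_cases hb : insB (fx, fy, fw, fh) (ex, ey, ew, eh)
    · rw [if_pos hb, ih (s + 1), updMany_updMany]
      have h2 : idxsN (fx, fy, fw, fh) ((ex, ey, ew, eh) :: t)
          = 0 :: (idxsN (fx, fy, fw, fh) t).map (· + 1) := by simp [idxsN, hb]
      rw [h2, List.map_cons, h3, List.filter_cons, if_pos hb]
      refine congrArg₂ Prod.mk rfl ?_
      simp [List.append_assoc]
    · rw [if_neg hb, ih (s + 1)]
      have h2 : idxsN (fx, fy, fw, fh) ((ex, ey, ew, eh) :: t)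
          = (idxsN (fx, fy, fw, fh) t).map (· + 1) := by simp [idxsN, hb]
      rw [h2, h3, List.filter_cons, if_neg (by simp [hb])]
        
lemma pyPopAt_succ (t : List (Int × Int × Int × Int)) (x : Int × Int × Int × Int) (n : Nat) :
    pyPopAt (x :: t) ((n : Int) + 1) = x :: pyPopAt t (n : Int) := by
  by_cases h : n < t.length
  · have h1 : ((n : Int) + 1) = ((n + 1 : Nat) : Int) := by push_cast; ring
    rw [h1]
    rw [pyPopAt, PySem.List.pop?_natCast _ _ (by simpa using Nat.succ_lt_succ h)]
    rw [pyPopAt, PySem.List.pop?_natCast _ _ h]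
    simp
  · have h1 : PySem.List.pop? (x :: t) ((n : Int) + 1) = none := by
      simp only [PySem.List.pop?, PySem.List.pyIdx?, List.length_cons]
      rw [if_pos (by omega), if_neg (by push_cast; omega)]
      rfl
    have h2 : PySem.List.pop? t ((n : Int)) = none := by
      simp only [PySem.List.pop?, PySem.List.pyIdx?]
      rw [if_pos (by omega), if_neg (by omega)]
      rfl
    rw [pyPopAt, h1, pyPopAt, h2]

lemma pops_shift (L : List Nat) (x : Int × Int × Int × Int) (t : List (Int × Int × Int × Int)) :
    (L.map (fun k : Nat => (k : Int) + 1)).foldr (fun j acc => pyPopAt acc j) (x :: t)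
      = x :: (L.map (fun k : Nat => (k : Int))).foldr (fun j acc => pyPopAt acc j) t := by
  induction L with
  | nil => simp
  | cons k L ih => simp only [List.map_cons, List.foldr_cons, ih, pyPopAt_succ]

lemma pops_spec (f : Int × Int × Int × Int) (u : List (Int × Int × Int × Int)) :
    ((idxsN f u).map (fun k : Nat => (k : Int))).reverse.foldl pyPopAt u
      = u.filter (fun e => !insB f e) := by
  rw [List.foldl_reverse]
  induction u with
  | nil => simp [idxsN]
  | cons e t ih =>
    have hm : (List.map (· + 1) (idxsN f t)).map (fun k : Nat => (k : Int))
        = (idxsN f t).map (fun k : Nat => (k : Int) + 1) := by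
      rw [List.map_map]; apply List.map_congr_left; intro k _
      simp only [Function.comp_apply, Nat.cast_add, Nat.cast_one]
    by_cases hb : insB f e
    · have h2 : idxsN f (e :: t) = 0 :: (idxsN f t).map (· + 1) := by simp [idxsN, hb]
      rw [h2, List.map_cons, List.foldr_cons, hm, pops_shift, ih]
      simp [pyPopAt, PySem.List.pop?_zero_cons, hb]
    · have h2 : idxsN f (e :: t) = (idxsN f t).map (· + 1) := by simp [idxsN, hb]
      rw [h2, hm, pops_shift, ih]
      simp [hb]

lemma stepFace_spec (i : Int) (f : Int × Int × Int × Int)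
    (m : List (Int × List (Int × Int × Int × Int))) (u : List (Int × Int × Int × Int)) :
    pyStepFace (m, u) (i, f)
      = (updMany m i (u.filter (insB f)), u.filter (fun e => !insB f e)) := by
  rcases f with ⟨fx, fy, fw, fh⟩
  rw [pyStepFace]
  rw [inner_spec]
  have hidx : (idxsN (fx, fy, fw, fh) u).map (fun k : Nat => (0 : Int) + (k : Int))
      = (idxsN (fx, fy, fw, fh) u).map (fun k : Nat => (k : Int)) := by
    apply List.map_congr_left; intro k _; ring
  simp only [List.nil_append, hidx]
  have hsorted : PySem.List.sorted ((idxsN (fx, fy, fw, fh) u).map (fun k : Nat => (k : Int))) (fun x => x) true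
      = ((idxsN (fx, fy, fw, fh) u).map (fun k : Nat => (k : Int))).reverse := by
    apply PySem.List.sorted_rev_eq_of_perm_of_pairwise_gt
    · exact List.reverse_perm _
    · rw [List.pairwise_reverse]
      rw [List.pairwise_map]
      exact (idxsN_pairwise _ _).imp (by intro a b h; exact_mod_cast h)
  rw [hsorted, pops_spec]

lemma outer_spec (ps : List (Int × (Int × Int × Int × Int))) :
    ∀ (m : List (Int × List (Int × Int × Int × Int))) (u : List (Int × Int × Int × Int)),
    ps.Pairwise (fun p q => p.1 ≠ q.1) →
    ps.foldl pyStepFace (m, u)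
      = (m.map (fun kv => (kv.1, kv.2 ++ u.filter (fun e => ownerPs ps e == some kv.1))),
         u.filter (fun e => (ownerPs ps e).isNone)) := by
  induction ps with
  | nil =>
    intro m u _
    have h1 : ∀ e : Int × Int × Int × Int, ownerPs [] e = none := by
      intro e; rcases e with ⟨ex, ey, ew, eh⟩; rfl
    simp [h1]
  | cons p ps ih =>
    intro m u hnd
    rcases p with ⟨i, f⟩
    rcases List.pairwise_cons.1 hnd with ⟨hi, hnd'⟩
    have hnotin : ∀ e : Int × Int × Int × Int, ¬ ownerPs ps e = some i := by
      intro e he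
      rcases List.mem_map.1 (ownerPs_mem ps e i he) with ⟨q, hq, hq1⟩
      exact hi q hq hq1.symm
    rw [List.foldl_cons, stepFace_spec, ih _ _ hnd']
    refine congrArg₂ Prod.mk ?_ ?_
    · rw [updMany, List.map_map]
      apply List.map_congr_left
      rintro ⟨k1, k2⟩ _
      simp only [Function.comp_apply]
      by_cases hk : k1 = i
      · rw [if_pos hk]
        have hnil : (u.filter (fun e => !insB f e)).filter (fun e => ownerPs ps e == some k1) = [] := by
          rw [List.filter_eq_nil_iff]
          intro e _ hc
          exact hnotin e (by rw [← hk]; exact beq_iff_eq.1 hc)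
        have hfc : u.filter (fun e => ownerPs ((i, f) :: ps) e == some k1) = u.filter (insB f) := by
          apply List.filter_congr
          intro e _
          rw [ownerPs_cons]
          by_cases hb : insB f e
          · simp [hb, hk]
          · have h5 : ¬ ownerPs ps e = some k1 := by rw [hk]; exact hnotin e
            simp [hb, h5]
        dsimp only
        rw [hnil, List.append_nil, hfc]
      · rw [if_neg hk]
        have hff : (u.filter (fun e => !insB f e)).filter (fun e => ownerPs ps e == some k1)
            = u.filter (fun e => ownerPs ((i, f) :: ps) e == some k1) := by
          rw [List.filter_filter]
          apply List.filter_congr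
          intro e _
          rw [ownerPs_cons]
          by_cases hb : insB f e
          · have hik : ¬ i = k1 := fun h => hk h.symm
            simp [hb, hik]
          · simp [hb]
        dsimp only
        rw [hff]
    · rw [List.filter_filter]
      apply List.filter_congr
      intro e _
      rw [ownerPs_cons]
      by_cases hb : insB f e <;> simp [hb]

-- ===== VERDICT (by name: the statement is the Claim_ definition above) =====
theorem associate_eyes_with_faces_py_spec : Claim_equal_associate_eyes_with_faces_py := by
  intro faces eyes _
  unfold Spec_associate_eyes_with_faces_py
  rw [associate_eyes_with_faces_py, associate_eyes_with_faces_py_alt]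
  have hnd : (PySem.List.enumerate faces 0).Pairwise (fun p q => p.1 ≠ q.1) :=
    (PySem.List.pairwise_lt_enumerate faces 0).imp (fun h => ne_of_lt h)
  rw [outer_spec _ _ _ hnd]
  refine congrArg₂ Prod.mk ?_ ?_
  · rw [List.map_map]
    apply List.map_congr_left
    intro i _
    simp [altOwner_eq_ownerPs]
  · apply List.filter_congr
    intro e _
    rw [altOwner_eq_ownerPs]
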